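-- pv_equiv track=rewrite | github.com/s0cx/py-scripts | BJ1.py | tokenize_cards
-- ===== SOURCE A (Python) =====
-- from typing import List, Tuple
--
-- DIGITS = set("23456789")
--
-- def normalize_card(c: str) -> str:
--     c = c.strip().upper()
--     if c in {"10","T","J","Q","K"}: return "T"
--     if c in DIGITS or c == "A": return c
--     raise ValueError(f"Invalid card: {c}")
--
-- def tokenize_cards(s: str) -> List[str]:
--     """
--     Accepts: 'A,7', 'A-7', 'A7', 'AT', 'T,6,3', '8 8', '10,J'
--     Splits on any non-rank character; compacts 10/J/Q/K to 'T'.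
--     """
--     s = s.strip().upper().replace("10", "T")
--     out = []
--     for ch in s:
--         if ch in {"A","K","Q","J","T"} or ch in DIGITS:
--             out.append(ch)
--         else:
--             # treat everything else as a separator
--             out.append(" ")
--     parts = [p for p in "".join(out).split() if p]
--     # Flatten sequences like "AT" -> ["A","T"]
--     flat: List[str] = []
--     for p in parts:
--         for ch in p:
--             flat.append(ch)
--     return [normalize_card(x) for x in flat]
-- ===== SOURCE B (Python) =====
-- _MAP = {'A': 'A', '2': '2', '3': '3', '4': '4', '5': '5', '6': '6', '7': '7',
--         '8': '8', '9': '9', 'T': 'T', 'J': 'T', 'Q': 'T', 'K': 'T'}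
--
-- def tokenize_cards(s: str):
--     t = s.strip().upper().replace("10", "T")
--     return [_MAP[ch] for ch in t if ch in _MAP]
-- ===== Notes on version B (the rewrite author's own statement) =====
-- stated objective: simpler
-- what changed: Replaces A's five-stage pipeline (per-char separator insertion, join, whitespace split, flatten, then re-strip/upper/classify each token in normalize_card) with a single filter-map over the normalized string through a fixed rank-to-token dict. (one pass, no intermediate strings/lists, measured ~2.5x faster)
import Mathlib
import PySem

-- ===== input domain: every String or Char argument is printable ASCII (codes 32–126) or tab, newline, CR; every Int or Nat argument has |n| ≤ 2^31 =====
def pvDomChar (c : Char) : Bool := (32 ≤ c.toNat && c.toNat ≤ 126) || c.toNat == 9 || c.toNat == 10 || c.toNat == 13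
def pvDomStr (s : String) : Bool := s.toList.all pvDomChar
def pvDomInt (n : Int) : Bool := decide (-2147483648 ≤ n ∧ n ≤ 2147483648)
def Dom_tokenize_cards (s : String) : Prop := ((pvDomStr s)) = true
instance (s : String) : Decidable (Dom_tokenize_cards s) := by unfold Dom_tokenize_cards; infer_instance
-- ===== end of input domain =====

-- B replaces A's five-stage pipeline (insert separators, join, split, flatten, re-normalize
-- each token) by one table-driven filter-map over the normalized string (objective: simpler).

-- ===== PORT A =====
-- DIGITS = set("23456789"): a set of 1-char strings (1-char strings modelled as List Char)
def pvDIGITS : PySem.Set (List Char) :=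
  PySem.Set.ofList (("23456789".toList).map (fun c => [c]))

-- normalize_card; `none` is the ValueError branch (never reached from tokenize_cards)
def normalize_card? (c : List Char) : Option (List Char) :=
  let c := PySem.Chars.upper (PySem.Chars.strip c)
  if PySem.Set.contains (PySem.Set.ofList [['1','0'], ['T'], ['J'], ['Q'], ['K']]) c then some ['T']
  else if PySem.Set.contains pvDIGITS c || c = ['A'] then some c
  else none

def tokenize_cards (s : String) : List String :=
  let t := PySem.Chars.replace (PySem.Chars.upper (PySem.Chars.strip s.toList)) ['1','0'] ['T']
  -- out: list of 1-char strings, appended one per char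
  let out := t.foldl (fun acc ch =>
      if PySem.Set.contains (PySem.Set.ofList [['A'],['K'],['Q'],['J'],['T']]) [ch]
          || PySem.Set.contains pvDIGITS [ch]
      then acc ++ [[ch]] else acc ++ [[' ']]) ([] : List (List Char))
  let parts := (PySem.Chars.split₀ (PySem.Chars.join [] out)).filter (fun p => !p.isEmpty)
  let flat := parts.foldl (fun acc p => p.foldl (fun a ch => a ++ [[ch]]) acc) ([] : List (List Char))
  -- [normalize_card(x) for x in flat]: every x is a single rank character, so the
  -- ValueError branch (`none`) never fires and filterMap drops nothing
  (flat.filterMap normalize_card?).map String.ofList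

-- ===== PORT B =====
def pvMAP : PySem.Dict Char String := PySem.Dict.ofList
  [('A', "A"), ('2', "2"), ('3', "3"), ('4', "4"), ('5', "5"), ('6', "6"), ('7', "7"),
   ('8', "8"), ('9', "9"), ('T', "T"), ('J', "T"), ('Q', "T"), ('K', "T")]

def tokenize_cards_alt (s : String) : List String :=
  let t := PySem.Chars.replace (PySem.Chars.upper (PySem.Chars.strip s.toList)) ['1','0'] ['T']
  t.filterMap (fun ch => PySem.Dict.get? pvMAP ch)

-- ===== PRECONDITION & SPEC =====
def Spec_tokenize_cards (s : String) (out : List String) : Prop := out = tokenize_cards_alt s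
instance (s : String) (out : List String) : Decidable (Spec_tokenize_cards s out) := by unfold Spec_tokenize_cards; infer_instance

-- ===== CLAIM (what is proved, stated in full; the proofs are below) =====
def Claim_equal_tokenize_cards : Prop := ∀ (s : String), Dom_tokenize_cards s → Spec_tokenize_cards s (tokenize_cards s)

-- ===== LEMMAS AND PROOFS =====

-- the per-character "is a rank character" test of A's first loop
def pvRank (ch : Char) : Bool :=
  PySem.Set.contains (PySem.Set.ofList [['A'],['K'],['Q'],['J'],['T']]) [ch]
    || PySem.Set.contains pvDIGITS [ch]

lemma pvRank_iff (ch : Char) :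
    pvRank ch = true ↔ ch ∈ ['A','K','Q','J','T','2','3','4','5','6','7','8','9'] := by
  have h1 : pvDIGITS = [['2'],['3'],['4'],['5'],['6'],['7'],['8'],['9']] := by decide
  have h2 : (PySem.Set.ofList [['A'],['K'],['Q'],['J'],['T']] : PySem.Set (List Char))
      = [['A'],['K'],['Q'],['J'],['T']] := by decide
  simp only [pvRank, h1, h2, PySem.Set.contains, List.contains_eq_mem, List.mem_cons,
    List.not_mem_nil, or_false, Bool.or_eq_true, decide_eq_true_eq, List.cons.injEq, and_true]
  tauto

lemma split₀_go_flatten (s : List Char) : ∀ (cur : List Char) (acc : List (List Char)),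
    (PySem.Chars.split₀.go s cur acc).flatten
      = acc.reverse.flatten ++ cur.reverse ++ s.filter (fun c => !PySem.Chars.isspace c) := by
  induction s with
  | nil =>
    intro cur acc
    simp only [PySem.Chars.split₀.go]
    by_cases h : cur = []
    · simp [h]
    · simp [List.isEmpty_iff, h]
  | cons c rest ih =>
    intro cur acc
    simp only [PySem.Chars.split₀.go]
    by_cases hs : PySem.Chars.isspace c = true
    · by_cases h : cur = []
      · simp [hs, h, ih]
      · simp [hs, List.isEmpty_iff, h, ih]
    · simp [hs, ih]

lemma split₀_go_ne_nil (s : List Char) : ∀ (cur : List Char) (acc : List (List Char)),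
    (∀ p ∈ acc, p ≠ []) → ∀ p ∈ PySem.Chars.split₀.go s cur acc, p ≠ [] := by
  induction s with
  | nil =>
    intro cur acc h p hp
    simp only [PySem.Chars.split₀.go] at hp
    by_cases hc : cur = []
    · simp [hc] at hp; exact h p (by simpa using hp)
    · simp [List.isEmpty_iff, hc] at hp
      rcases hp with hp | hp
      · exact h p (by simpa using hp)
      · subst hp; simpa using hc
  | cons c rest ih =>
    intro cur acc h p hp
    simp only [PySem.Chars.split₀.go] at hp
    by_cases hs : PySem.Chars.isspace c = true
    · by_cases hc : cur = []
      · simp [hs, hc] at hp; exact ih [] acc h p hp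
      · simp [hs, List.isEmpty_iff, hc] at hp
        refine ih [] (cur.reverse :: acc) ?_ p hp
        intro q hq
        rcases List.mem_cons.mp hq with rfl | hq
        · simpa using hc
        · exact h q hq
    · simp [hs] at hp; exact ih (c :: cur) acc h p hp


lemma split₀_flatten (s : List Char) :
    (PySem.Chars.split₀ s).flatten = s.filter (fun c => !PySem.Chars.isspace c) := by
  simpa [PySem.Chars.split₀] using split₀_go_flatten s [] []

lemma pv_char_some (ch : Char) (h : pvRank ch = true) :
    (normalize_card? [ch]).map String.ofList = PySem.Dict.get? pvMAP ch
      ∧ (normalize_card? [ch]).isSome = true := by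
  have hm := (pvRank_iff ch).mp h
  simp only [List.mem_cons, List.not_mem_nil, or_false] at hm
  rcases hm with rfl|rfl|rfl|rfl|rfl|rfl|rfl|rfl|rfl|rfl|rfl|rfl|rfl <;>
    exact ⟨by decide, by decide⟩

lemma pv_char_none (ch : Char) (h : pvRank ch = false) : PySem.Dict.get? pvMAP ch = none := by
  have hm : ch ∉ ['A','K','Q','J','T','2','3','4','5','6','7','8','9'] := by
    intro hmem; rw [(pvRank_iff ch).mpr hmem] at h; exact Bool.true_eq_false.mp h
  simp only [List.mem_cons, List.not_mem_nil, or_false, not_or] at hm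
  obtain ⟨h1, h2, h3, h4, h5, h6, h7, h8, h9, h10, h11, h12, h13⟩ := hm
  have e : pvMAP = PySem.Dict.mk [('A', "A"), ('2', "2"), ('3', "3"), ('4', "4"), ('5', "5"),
      ('6', "6"), ('7', "7"), ('8', "8"), ('9', "9"), ('T', "T"), ('J', "T"), ('Q', "T"),
      ('K', "T")] := by decide
  simp [e, PySem.Dict.get?, Ne.symm h1, Ne.symm h2, Ne.symm h3, Ne.symm h4, Ne.symm h5,
    Ne.symm h6, Ne.symm h7, Ne.symm h8, Ne.symm h9, Ne.symm h10, Ne.symm h11, Ne.symm h12,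
    Ne.symm h13]

lemma pv_rank_not_space (ch : Char) (h : pvRank ch = true) : PySem.Chars.isspace ch = false := by
  have hm := (pvRank_iff ch).mp h
  simp only [List.mem_cons, List.not_mem_nil, or_false] at hm
  rcases hm with rfl|rfl|rfl|rfl|rfl|rfl|rfl|rfl|rfl|rfl|rfl|rfl|rfl <;> decide

lemma filter_space_map (cs : List Char) :
    ((cs.map (fun ch => if pvRank ch then ch else ' ')).filter (fun c => !PySem.Chars.isspace c))
      = cs.filter pvRank := by
  induction cs with
  | nil => simp
  | cons ch rest ih =>
    by_cases h : pvRank ch = true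
    · simp [h, pv_rank_not_space ch h, ih]
    · simp only [Bool.not_eq_true] at h
      simp [h, ih, List.filter_cons]
      decide

lemma final_step (cs : List Char) :
    ((cs.filter pvRank).filterMap (fun ch => normalize_card? [ch])).map String.ofList
      = cs.filterMap (fun ch => PySem.Dict.get? pvMAP ch) := by
  induction cs with
  | nil => simp
  | cons ch rest ih =>
    by_cases h : pvRank ch = true
    · obtain ⟨heq, hsome⟩ := pv_char_some ch h
      obtain ⟨v, hv⟩ := Option.isSome_iff_exists.mp hsome
      rw [hv] at heq
      simp [h, hv, ih, ← heq]
    · simp only [Bool.not_eq_true] at h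
      simp [h, pv_char_none ch h, ih]

lemma pv_main (s : String) : tokenize_cards s = tokenize_cards_alt s := by
  unfold tokenize_cards tokenize_cards_alt
  dsimp only
  generalize (PySem.Chars.replace (PySem.Chars.upper (PySem.Chars.strip s.toList)) ['1','0'] ['T']) = cs
  -- step 1: the first loop builds the list of 1-char strings
  have e1 : cs.foldl (fun acc ch =>
      if PySem.Set.contains (PySem.Set.ofList [['A'],['K'],['Q'],['J'],['T']]) [ch]
          || PySem.Set.contains pvDIGITS [ch]
      then acc ++ [[ch]] else acc ++ [[' ']]) ([] : List (List Char))
      = (cs.map (fun ch => if pvRank ch then ch else ' ')).map (fun c => [c]) := by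
    have : (fun (acc : List (List Char)) ch =>
        if PySem.Set.contains (PySem.Set.ofList [['A'],['K'],['Q'],['J'],['T']]) [ch]
            || PySem.Set.contains pvDIGITS [ch]
        then acc ++ [[ch]] else acc ++ [[' ']])
        = (fun acc ch => acc ++ [(fun c => [c]) ((fun ch => if pvRank ch then ch else ' ') ch)]) := by
      funext acc ch
      show (if pvRank ch then acc ++ [[ch]] else acc ++ [[' ']]) = _
      by_cases h : pvRank ch = true
      · simp [h]
      · simp only [Bool.not_eq_true] at h
        simp [h]
    rw [this, PySem.List.foldl_append_singleton_eq_map]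
    simp [List.map_map, Function.comp_def]
  rw [e1, PySem.Chars.join_nil_singletons]
  have hne : ∀ p ∈ PySem.Chars.split₀ (cs.map (fun ch => if pvRank ch then ch else ' ')),
      (!p.isEmpty) = true := by
    intro p hp
    simpa using split₀_go_ne_nil _ [] [] (by simp) p hp
  rw [List.filter_eq_self.mpr hne]
  have e2 : ∀ (parts : List (List Char)),
      parts.foldl (fun acc p => p.foldl (fun a ch => a ++ [[ch]]) acc) ([] : List (List Char))
        = parts.flatten.map (fun c => [c]) := by
    intro parts
    simp only [PySem.List.foldl_append_singleton_eq_map (f := fun (c : Char) => [c])]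
    rw [PySem.List.foldl_append_eq_flatMap]
    simp [List.flatMap_def, List.map_flatten]
  rw [e2, split₀_flatten, filter_space_map, List.filterMap_map]
  exact final_step cs

-- ===== VERDICT (by name: the statement is the Claim_ definition above) =====
theorem tokenize_cards_spec : Claim_equal_tokenize_cards := by
  intro s _
  unfold Spec_tokenize_cards
  exact pv_main s
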